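-- pv_equiv track=rewrite | github.com/leozhang2056/leozhang2056 | app/backend/generate_cv_from_kb.py | _pick_concrete_jd_terms_for_summary
-- ===== SOURCE A (Python) =====
-- from typing import List, Dict, Any, Optional, Union
--
-- MAX_TERM_LENGTH = 24
--
-- MIN_TERM_LENGTH = 3
--
-- def _pick_concrete_jd_terms_for_summary(normed_kws: List[str], limit: int = 4) -> List[str]:
--     """
--     从 JD 词里挑出更像「具体技术/工具」的项，避免 Summary 变成逗号分隔的关键词墙（ATS/人工都易判为模板或 AI 腔）。
--     """
--     if not normed_kws:
--         return []
--     generic_penalty = {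
--         "engineering", "development", "experience", "agile", "team", "mentoring",
--         "leadership", "customer", "stakeholder", "communication", "collaboration",
--         "innovation", "passionate", "proactive", "world-class", "dynamic",
--     }
--     scored: List[tuple] = []
--     for kw in normed_kws:
--         t = str(kw).strip()
--         if len(t) < MIN_TERM_LENGTH:
--             continue
--         score = min(len(t), MAX_TERM_LENGTH)
--         tl = t.lower()
--         if "/" in t or "-" in t or "." in t:
--             score += 5
--         if any(c.isupper() for c in t):
--             score += 2
--         if tl in generic_penalty:
--             score -= 8
--         if len(t) <= 4 and tl.isalpha() and tl not in {"api", "sql", "aws", "git", "mvc", "mvp", "sdk", "iot"}: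
--             score -= 3
--         scored.append((score, t))
--     scored.sort(key=lambda x: (-x[0], x[1].lower()))
--     out: List[str] = []
--     seen = set()
--     for _, t in scored:
--         k = t.lower()
--         if k in seen:
--             continue
--         seen.add(k)
--         out.append(t)
--         if len(out) >= limit:
--             break
--     return out if out else normed_kws[:limit]
-- ===== SOURCE B (Python) =====
-- MAX_TERM_LENGTH = 24
-- MIN_TERM_LENGTH = 3
--
-- _GENERIC_PENALTY = {
--     "engineering", "development", "experience", "agile", "team", "mentoring",
--     "leadership", "customer", "stakeholder", "communication", "collaboration",
--     "innovation", "passionate", "proactive", "world-class", "dynamic",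
-- }
-- _SHORT_OK = {"api", "sql", "aws", "git", "mvc", "mvp", "sdk", "iot"}
--
--
-- def _score(t: str, tl: str) -> int:
--     return (min(len(t), MAX_TERM_LENGTH)
--             + (5 if ("/" in t or "-" in t or "." in t) else 0)
--             + (2 if any(c.isupper() for c in t) else 0)
--             - (8 if tl in _GENERIC_PENALTY else 0)
--             - (3 if (len(t) <= 4 and tl.isalpha() and tl not in _SHORT_OK) else 0))
--
--
-- def _pick_concrete_jd_terms_for_summary(normed_kws, limit=4):
--     if not normed_kws:
--         return []
--     # one pass: best representative per lowercase key (max score, earliest wins ties)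
--     best = {}
--     for kw in normed_kws:
--         t = str(kw).strip()
--         if len(t) < MIN_TERM_LENGTH:
--             continue
--         tl = t.lower()
--         score = _score(t, tl)
--         prev = best.get(tl)
--         if prev is None or score > prev[0]:
--             best[tl] = (score, t)
--     ranked = sorted(best.items(), key=lambda kv: (-kv[1][0], kv[0]))
--     out = []
--     for _, (_, t) in ranked:
--         out.append(t)
--         if len(out) >= limit:
--             break
--     return out if out else normed_kws[:limit]
-- ===== Notes on version B (the rewrite author's own statement) =====
-- stated objective: alternative
-- what changed: B replaces A's build-all-scored-pairs + sort + post-sort seen-set dedup with a single scoring pass that keeps one best (strict-max score, earliest) representative per lowercase key in a dict, then sorts only the distinct items by (-score, key) and takes the first limit.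
import Mathlib
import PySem

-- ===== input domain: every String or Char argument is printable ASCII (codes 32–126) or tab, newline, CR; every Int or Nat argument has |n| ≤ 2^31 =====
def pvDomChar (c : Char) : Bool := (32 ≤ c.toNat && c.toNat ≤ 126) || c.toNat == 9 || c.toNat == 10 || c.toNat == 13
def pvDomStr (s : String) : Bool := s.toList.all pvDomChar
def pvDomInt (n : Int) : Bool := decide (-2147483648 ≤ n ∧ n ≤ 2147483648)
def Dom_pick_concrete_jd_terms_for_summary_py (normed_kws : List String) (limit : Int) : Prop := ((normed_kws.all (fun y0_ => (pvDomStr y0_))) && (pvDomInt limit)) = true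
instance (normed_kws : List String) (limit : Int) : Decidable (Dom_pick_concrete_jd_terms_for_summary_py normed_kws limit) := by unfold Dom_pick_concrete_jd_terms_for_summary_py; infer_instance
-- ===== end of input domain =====

-- B re-decomposes A: one scoring pass builds a dict keyed by lowercase term (keeping the
-- strict-max-score, earliest representative), so the sort runs over distinct keys only and
-- A's post-sort seen-set dedup disappears; same return value on every input (objective: alternative).

-- ===== PORT A =====
-- shared literal data (the two Python modules' set literals)
def pvGenericPenalty : List String :=
  ["engineering", "development", "experience", "agile", "team", "mentoring",
   "leadership", "customer", "stakeholder", "communication", "collaboration",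
   "innovation", "passionate", "proactive", "world-class", "dynamic"]
def pvShortOk : List String := ["api", "sql", "aws", "git", "mvc", "mvp", "sdk", "iot"]

-- A's in-place score accumulation (score = …; score += …)
def pvScoreA (t : String) : Int :=
  let score := min (PySem.Str.len t) 24
  let tl := PySem.Str.lower t
  let score := if PySem.Str.isIn "/" t || PySem.Str.isIn "-" t || PySem.Str.isIn "." t then score + 5 else score
  let score := if t.toList.any PySem.Chars.isupper then score + 2 else score
  let score := if pvGenericPenalty.contains tl then score - 8 else score
  let score := if PySem.Str.len t ≤ 4 && PySem.Str.strIsalpha tl && !(pvShortOk.contains tl) then score - 3 else score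
  score

-- Python sort key (-x[0], x[1].lower()) — lexicographic pair, strings by code points
def pvKeyA (p : Int × String) : Int ×ₗ List Char := toLex (-p.1, (PySem.Str.lower p.2).toList)

-- A's output loop: skip seen lowercase keys, append, break once len(out) >= limit
def pvTakeA (limit : Int) : List (Int × String) → PySem.Set String → List String → List String
  | [], _, out => out
  | p :: rest, seen, out =>
      let k := PySem.Str.lower p.2
      if PySem.Set.contains seen k then pvTakeA limit rest seen out
      else
        let seen' := PySem.Set.add seen k
        let out' := out ++ [p.2]
        if limit ≤ (out'.length : Int) then out' else pvTakeA limit rest seen' out'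

def pick_concrete_jd_terms_for_summary_py (normed_kws : List String) (limit : Int) : List String :=
  if normed_kws = [] then []
  else
    let scored : List (Int × String) := normed_kws.foldl (fun acc kw =>
      let t := PySem.Str.strip kw
      if PySem.Str.len t < 3 then acc else acc ++ [(pvScoreA t, t)]) []
    let sortedScored := PySem.List.sorted scored pvKeyA
    let out := pvTakeA limit sortedScored PySem.Set.empty []
    if out = [] then PySem.List.slice normed_kws none (some limit) else out

-- ===== PORT B =====
-- B's one-expression score (same quantities, summed arithmetically)
def pvScoreB (t : String) (tl : String) : Int :=
  min (PySem.Str.len t) 24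
  + (if PySem.Str.isIn "/" t || PySem.Str.isIn "-" t || PySem.Str.isIn "." t then 5 else 0)
  + (if t.toList.any PySem.Chars.isupper then 2 else 0)
  - (if pvGenericPenalty.contains tl then 8 else 0)
  - (if PySem.Str.len t ≤ 4 && PySem.Str.strIsalpha tl && !(pvShortOk.contains tl) then 3 else 0)

-- B's sort key (-kv[1][0], kv[0]) over dict items
def pvKeyB (kv : String × (Int × String)) : Int ×ₗ List Char := toLex (-kv.2.1, kv.1.toList)

-- B's scoring pass: dict lowercase-key -> (score, text), updated on strictly better score
def pvBestStep (d : PySem.Dict String (Int × String)) (kw : String) : PySem.Dict String (Int × String) :=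
  let t := PySem.Str.strip kw
  if PySem.Str.len t < 3 then d
  else
    let tl := PySem.Str.lower t
    let score := pvScoreB t tl
    match d.get? tl with
    | some prev => if prev.1 < score then d.insert tl (score, t) else d
    | none => d.insert tl (score, t)

-- B's output loop over the already-distinct ranked items
def pvTakeB (limit : Int) : List (String × (Int × String)) → List String → List String
  | [], out => out
  | kv :: rest, out =>
      let out' := out ++ [kv.2.2]
      if limit ≤ (out'.length : Int) then out' else pvTakeB limit rest out'

def pick_concrete_jd_terms_for_summary_py_alt (normed_kws : List String) (limit : Int) : List String :=
  if normed_kws = [] then []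
  else
    let best := normed_kws.foldl pvBestStep PySem.Dict.empty
    let ranked := PySem.List.sorted best.items pvKeyB
    let out := pvTakeB limit ranked []
    if out = [] then PySem.List.slice normed_kws none (some limit) else out

-- ===== PRECONDITION & SPEC =====
def Spec_pick_concrete_jd_terms_for_summary_py (normed_kws : List String) (limit : Int) (out : List String) : Prop := out = pick_concrete_jd_terms_for_summary_py_alt normed_kws limit
instance (normed_kws : List String) (limit : Int) (out : List String) : Decidable (Spec_pick_concrete_jd_terms_for_summary_py normed_kws limit out) := by unfold Spec_pick_concrete_jd_terms_for_summary_py; infer_instance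

-- ===== CLAIM (what is proved, stated in full; the proofs are below) =====
def Claim_equal_pick_concrete_jd_terms_for_summary_py : Prop := ∀ (normed_kws : List String) (limit : Int), Dom_pick_concrete_jd_terms_for_summary_py normed_kws limit → Spec_pick_concrete_jd_terms_for_summary_py normed_kws limit (pick_concrete_jd_terms_for_summary_py normed_kws limit)

-- ===== LEMMAS AND PROOFS =====

-- the lowercase key of a scored pair
def pvKey2 (p : Int × String) : String := PySem.Str.lower p.2

-- per-key best-representative accumulator (new value wins only on strictly larger score)
def pvCombine (cur : Option (Int × String)) (p : Int × String) : Option (Int × String) :=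
  match cur with
  | none => some p
  | some c => if c.1 < p.1 then some p else some c

-- the per-key representative of a scored list
def pvRep (S : List (Int × String)) (k : String) : Option (Int × String) :=
  S.foldl (fun cur p => if pvKey2 p = k then pvCombine cur p else cur) none

-- the scored list both programs effectively build
def pvScored (normed : List String) : List (Int × String) :=
  (normed.filter (fun kw => decide (¬ (PySem.Str.len (PySem.Str.strip kw) < 3)))).map
    (fun kw => (pvScoreA (PySem.Str.strip kw), PySem.Str.strip kw))

-- first-occurrence-per-key dedup, as A's seen-set loop performs it
def pvDedup : PySem.Set String → List (Int × String) → List (Int × String)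
  | _, [] => []
  | seen, p :: r =>
      if PySem.Set.contains seen (pvKey2 p) then pvDedup seen r
      else p :: pvDedup (PySem.Set.add seen (pvKey2 p)) r

-- common take-until-limit loop on plain texts
def pvTakeL (limit : Int) : List String → List String → List String
  | [], out => out
  | t :: r, out =>
      let out' := out ++ [t]
      if limit ≤ (out'.length : Int) then out' else pvTakeL limit r out'

theorem pvScore_eq (t : String) : pvScoreA t = pvScoreB t (PySem.Str.lower t) := by
  unfold pvScoreA pvScoreB
  dsimp only
  split_ifs <;> omega

theorem pvScored_eq (normed : List String) :
    normed.foldl (fun acc kw =>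
      let t := PySem.Str.strip kw
      if PySem.Str.len t < 3 then acc else acc ++ [(pvScoreA t, t)]) [] = pvScored normed := by
  have h : ∀ (acc : List (Int × String)), ∀ kw ∈ normed,
      (let t := PySem.Str.strip kw
       if PySem.Str.len t < 3 then acc else acc ++ [(pvScoreA t, t)]) =
      (if ¬ (PySem.Str.len (PySem.Str.strip kw) < 3) then
        acc ++ [(pvScoreA (PySem.Str.strip kw), PySem.Str.strip kw)] else acc) := by
    intro acc kw _
    dsimp only
    split_ifs <;> rfl
  rw [PySem.List.foldl_congr_mem _ _ _ _ h, PySem.List.foldl_append_ite]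
  simp [pvScored]

theorem pvBestStep_get? (d : PySem.Dict String (Int × String)) (kw : String) (k : String) :
    (pvBestStep d kw).get? k =
      (let t := PySem.Str.strip kw
       if PySem.Str.len t < 3 then d.get? k
       else if PySem.Str.lower t = k then pvCombine (d.get? k) (pvScoreB t (PySem.Str.lower t), PySem.Str.strip kw)
       else d.get? k) := by
  unfold pvBestStep
  dsimp only
  by_cases h3 : PySem.Str.len (PySem.Str.strip kw) < 3
  · rw [if_pos h3, if_pos h3]
  · rw [if_neg h3, if_neg h3]
    by_cases hk : PySem.Str.lower (PySem.Str.strip kw) = k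
    · rw [if_pos hk]
      subst hk
      cases hget : d.get? (PySem.Str.lower (PySem.Str.strip kw)) with
      | none => dsimp only; rw [PySem.Dict.get?_insert_self]; rfl
      | some prev =>
        dsimp only
        by_cases hlt : prev.1 < pvScoreB (PySem.Str.strip kw) (PySem.Str.lower (PySem.Str.strip kw))
        · rw [if_pos hlt, PySem.Dict.get?_insert_self, pvCombine, if_pos hlt]
        · rw [if_neg hlt]
          rw [hget, pvCombine]
          dsimp only
          rw [if_neg hlt]
    · rw [if_neg hk]
      cases hget : d.get? (PySem.Str.lower (PySem.Str.strip kw)) with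
      | none => exact PySem.Dict.get?_insert_of_ne d _ (fun h => hk h.symm)
      | some prev =>
        dsimp only
        by_cases hlt : prev.1 < pvScoreB (PySem.Str.strip kw) (PySem.Str.lower (PySem.Str.strip kw))
        · rw [if_pos hlt]
          exact PySem.Dict.get?_insert_of_ne d _ (fun h => hk h.symm)
        · rw [if_neg hlt]

theorem pvGet?_fold (L : List String) (d : PySem.Dict String (Int × String)) (k : String) :
    (L.foldl pvBestStep d).get? k =
      L.foldl (fun cur kw =>
        let t := PySem.Str.strip kw
        if PySem.Str.len t < 3 then cur
        else if PySem.Str.lower t = k then pvCombine cur (pvScoreB t (PySem.Str.lower t), PySem.Str.strip kw) else cur)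
        (d.get? k) := by
  induction L generalizing d with
  | nil => rfl
  | cons kw L ih =>
    simp only [List.foldl_cons]
    rw [ih, pvBestStep_get?]

theorem pvGet?_eq_rep (L : List String) (k : String) :
    (L.foldl pvBestStep PySem.Dict.empty).get? k = pvRep (pvScored L) k := by
  rw [pvGet?_fold, PySem.Dict.get?_empty]
  have hflip : ∀ (cur : Option (Int × String)), ∀ kw ∈ L,
      (let t := PySem.Str.strip kw
       if PySem.Str.len t < 3 then cur
       else if PySem.Str.lower t = k then pvCombine cur (pvScoreB t (PySem.Str.lower t), PySem.Str.strip kw) else cur) =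
      (if ¬ (PySem.Str.len (PySem.Str.strip kw) < 3) then
        (if PySem.Str.lower (PySem.Str.strip kw) = k then
          pvCombine cur (pvScoreB (PySem.Str.strip kw) (PySem.Str.lower (PySem.Str.strip kw)), PySem.Str.strip kw)
         else cur)
       else cur) := by
    intro cur kw _
    dsimp only
    split_ifs <;> rfl
  rw [PySem.List.foldl_congr_mem _ _ _ _ hflip, PySem.List.foldl_ite_eq_foldl_filter]
  unfold pvRep pvScored
  rw [List.foldl_map]
  refine PySem.List.foldl_congr_mem _ _ _ _ ?_
  intro cur kw hkw
  simp only [pvKey2, pvScore_eq]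

theorem pvBestStep_keys_nodup (d : PySem.Dict String (Int × String)) (kw : String)
    (h : d.keys.Nodup) : (pvBestStep d kw).keys.Nodup := by
  unfold pvBestStep
  dsimp only
  split_ifs with h3
  · exact h
  · cases hget : d.get? (PySem.Str.lower (PySem.Str.strip kw)) with
    | none => exact PySem.Dict.nodup_keys_insert d _ _ h
    | some prev =>
      dsimp only
      split_ifs with hlt
      · exact PySem.Dict.nodup_keys_insert d _ _ h
      · exact h

theorem pvKeys_nodup (L : List String) :
    (L.foldl pvBestStep PySem.Dict.empty).keys.Nodup := by
  have aux : ∀ (L : List String) (d : PySem.Dict String (Int × String)),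
      d.keys.Nodup → (L.foldl pvBestStep d).keys.Nodup := by
    intro L
    induction L with
    | nil => intro d h; exact h
    | cons kw L ih =>
      intro d h
      exact ih _ (pvBestStep_keys_nodup d kw h)
  exact aux L _ (by rw [PySem.Dict.keys_empty]; exact List.nodup_nil)

theorem pvMem_items (d : PySem.Dict String (Int × String)) (hnd : d.keys.Nodup) (k : String) (p : Int × String) :
    (k, p) ∈ d.items ↔ d.get? k = some p := by
  rw [PySem.Dict.items_eq_map_keys d hnd (0, "")]
  constructor
  · intro hmem
    rcases List.mem_map.mp hmem with ⟨k', hk', heq⟩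
    injection heq with h1 h2
    subst h1
    cases hget : d.get? k' with
    | none => exact absurd hk' ((PySem.Dict.get?_eq_none_iff_not_mem_keys d k').mp hget)
    | some q =>
      simp [PySem.Dict.getD, hget] at h2
      rw [h2]
  · intro hget
    refine List.mem_map.mpr ⟨k, ?_, ?_⟩
    · by_contra hk
      rw [← PySem.Dict.get?_eq_none_iff_not_mem_keys] at hk
      simp [hk] at hget
    · simp [PySem.Dict.getD, hget]

theorem pvRep_key (S : List (Int × String)) (k : String) (p : Int × String)
    (h : pvRep S k = some p) : pvKey2 p = k := by
  have aux : ∀ (S : List (Int × String)) (cur : Option (Int × String)),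
      (∀ c, cur = some c → pvKey2 c = k) →
      ∀ p, S.foldl (fun cur p => if pvKey2 p = k then pvCombine cur p else cur) cur = some p →
      pvKey2 p = k := by
    intro S
    induction S with
    | nil => intro cur hc p hp; exact hc p hp
    | cons q rest ih =>
      intro cur hc p hp
      simp only [List.foldl_cons] at hp
      refine ih _ ?_ p hp
      intro c hcq
      by_cases hq : pvKey2 q = k
      · rw [if_pos hq] at hcq
        cases hcur : cur with
        | none => rw [hcur] at hcq; simp [pvCombine] at hcq; rw [← hcq]; exact hq
        | some c0 =>
          rw [hcur] at hcq
          by_cases hlt : c0.1 < q.1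
          · simp [pvCombine, hlt] at hcq; rw [← hcq]; exact hq
          · simp [pvCombine, hlt] at hcq; rw [← hcq]; exact hc c0 hcur
      · rw [if_neg hq] at hcq
        exact hc c hcq
  exact aux S none (by simp) p h

theorem pvInsertBy_eq (bf : (Int × String) → (Int × String) → Bool) (x : Int × String) (l : List (Int × String)) :
    PySem.List.insertBy bf x l =
      l.takeWhile (fun y => !bf x y) ++ x :: l.dropWhile (fun y => !bf x y) := by
  induction l with
  | nil => simp [PySem.List.insertBy]
  | cons y ys ih =>
    by_cases hb : bf x y
    · simp [PySem.List.insertBy, hb]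
    · simp [PySem.List.insertBy, hb, ih]

theorem pvHead_dropWhile {α : Type} (p : α → Bool) (l : List α) (y : α)
    (h : (l.dropWhile p).head? = some y) : p y = false := by
  induction l with
  | nil => simp at h
  | cons x xs ih =>
    rw [List.dropWhile_cons] at h
    split at h
    · exact ih h
    · simp_all

theorem pvLex_le_same (c x : Int × String) (hle : pvKeyA c ≤ pvKeyA x) (hk : pvKey2 c = pvKey2 x) :
    ¬ c.1 < x.1 := by
  have hsnd : (PySem.Str.lower c.2).toList = (PySem.Str.lower x.2).toList := by
    unfold pvKey2 at hk; rw [hk]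
  unfold pvKeyA at hle
  rcases Prod.Lex.toLex_le_toLex.mp hle with h | ⟨h1, h2⟩
  · simp only at h; omega
  · simp only at h1; omega

theorem pvLex_lt_same (x c : Int × String) (hlt : pvKeyA x < pvKeyA c) (hk : pvKey2 x = pvKey2 c) :
    c.1 < x.1 := by
  have hsnd : (PySem.Str.lower x.2).toList = (PySem.Str.lower c.2).toList := by
    unfold pvKey2 at hk; rw [hk]
  unfold pvKeyA at hlt
  rcases Prod.Lex.toLex_lt_toLex.mp hlt with h | ⟨h1, h2⟩
  · simp only at h; omega
  · rw [hsnd] at h2; exact absurd h2 (lt_irrefl _)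

theorem pvHead_filter_insertBy (k : String) (x : Int × String) (l : List (Int × String))
    (hl : l.Pairwise (fun a b => pvKeyA a ≤ pvKeyA b)) :
    ((PySem.List.insertBy (fun a b => decide (pvKeyA a < pvKeyA b)) x l).filter
        (fun q => decide (pvKey2 q = k))).head? =
      if pvKey2 x = k then pvCombine ((l.filter (fun q => decide (pvKey2 q = k))).head?) x
      else (l.filter (fun q => decide (pvKey2 q = k))).head? := by
  rw [pvInsertBy_eq]
  set bf := fun (a b : Int × String) => decide (pvKeyA a < pvKeyA b) with hbf
  set f := fun (q : Int × String) => decide (pvKey2 q = k) with hf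
  set tk := l.takeWhile (fun y => !bf x y) with htkdef
  set dp := l.dropWhile (fun y => !bf x y) with hdpdef
  have hfl : l.filter f = tk.filter f ++ dp.filter f := by
    conv_lhs => rw [← List.takeWhile_append_dropWhile (p := fun y => !bf x y) (l := l)]
    rw [List.filter_append]
  rw [List.filter_append, List.filter_cons]
  by_cases hx : pvKey2 x = k
  · rw [if_pos hx]
    rw [if_pos (show f x = true by simp [hf, hx])]
    rw [List.head?_append, hfl, List.head?_append]
    cases htk : (tk.filter f).head? with
    | some c =>
      have hc_mem : c ∈ tk.filter f := List.mem_of_mem_head? (by rw [htk]; rfl)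
      have hc_tk : c ∈ tk := (List.mem_filter.mp hc_mem).1
      have hc_k : pvKey2 c = k := by
        have := (List.mem_filter.mp hc_mem).2
        simpa [hf] using this
      have hble : bf x c = false := by
        have := List.mem_takeWhile_imp hc_tk
        simpa using this
      have hle : pvKeyA c ≤ pvKeyA x := by
        have : ¬ pvKeyA x < pvKeyA c := by simpa [hbf] using hble
        exact not_lt.mp this
      have hnlt : ¬ c.1 < x.1 := pvLex_le_same c x hle (by rw [hc_k, hx])
      simp only [Option.some_or]
      rw [pvCombine]
      rw [if_neg hnlt]
    | none =>
      simp only [Option.none_or, List.head?_cons]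
      cases hdp : (dp.filter f).head? with
      | none => rfl
      | some c =>
        have hc_mem : c ∈ dp.filter f := List.mem_of_mem_head? (by rw [hdp]; rfl)
        have hc_dp : c ∈ dp := (List.mem_filter.mp hc_mem).1
        have hc_k : pvKey2 c = k := by
          have := (List.mem_filter.mp hc_mem).2
          simpa [hf] using this
        have hlt : pvKeyA x < pvKeyA c := by
          cases hdpl : dp with
          | nil => rw [hdpl] at hc_dp; simp at hc_dp
          | cons y0 rest =>
            have hy0 : (fun y => !bf x y) y0 = false := by
              apply pvHead_dropWhile (fun y => !bf x y) l y0
              rw [← hdpdef, hdpl]; rfl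
            have hxy0 : pvKeyA x < pvKeyA y0 := by
              simp only [Bool.not_eq_false'] at hy0
              simpa [hbf] using hy0
            have hpw : dp.Pairwise (fun a b => pvKeyA a ≤ pvKeyA b) :=
              List.Pairwise.sublist (by rw [hdpdef]; exact List.dropWhile_sublist _) hl
            rw [hdpl] at hpw hc_dp
            rcases List.mem_cons.mp hc_dp with rfl | hrest
            · exact hxy0
            · exact lt_of_lt_of_le hxy0 ((List.pairwise_cons.mp hpw).1 c hrest)
        have hclt : c.1 < x.1 := pvLex_lt_same x c hlt (by rw [hc_k, hx])
        rw [pvCombine]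
        rw [if_pos hclt]
  · rw [if_neg hx]
    rw [if_neg (show ¬ f x = true by simp [hf, hx])]
    rw [hfl, List.head?_append]

theorem pvSortedFirst (S : List (Int × String)) (k : String) :
    ((PySem.List.sorted S pvKeyA).filter (fun q => decide (pvKey2 q = k))).head? = pvRep S k := by
  induction S using List.reverseRecOn with
  | nil => simp [PySem.List.sorted, pvRep]
  | append_singleton S x ih =>
    have hsorted : PySem.List.sorted (S ++ [x]) pvKeyA =
        PySem.List.insertBy (fun a b => decide (pvKeyA a < pvKeyA b)) x (PySem.List.sorted S pvKeyA) := by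
      simp [PySem.List.sorted, List.foldl_append]
    rw [hsorted, pvHead_filter_insertBy k x _ (PySem.List.sorted_pairwise S pvKeyA), ih]
    unfold pvRep
    rw [List.foldl_append]
    simp only [List.foldl_cons, List.foldl_nil]

theorem pvMem_dedup (xs : List (Int × String)) (seen : PySem.Set String) (p : Int × String) :
    p ∈ pvDedup seen xs ↔
      pvKey2 p ∉ seen ∧ (xs.filter (fun q => decide (pvKey2 q = pvKey2 p))).head? = some p := by
  induction xs generalizing seen with
  | nil => simp [pvDedup]
  | cons x r ih =>
    simp only [pvDedup, List.filter_cons]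
    by_cases hs : PySem.Set.contains seen (pvKey2 x) = true
    · rw [if_pos hs]
      have hxs : pvKey2 x ∈ seen := (PySem.Set.contains_iff seen (pvKey2 x)).mp hs
      by_cases hk : pvKey2 x = pvKey2 p
      · rw [ih]
        constructor <;> (rintro ⟨hns, -⟩; exact absurd (hk ▸ hxs) hns)
      · rw [if_neg (by simpa using hk)]
        exact ih seen
    · rw [if_neg hs]
      have hxs : pvKey2 x ∉ seen := fun hm => hs ((PySem.Set.contains_iff seen (pvKey2 x)).mpr hm)
      simp only [List.mem_cons]
      rw [ih]
      by_cases hk : pvKey2 x = pvKey2 p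
      · rw [if_pos (by simpa using hk)]
        simp only [List.head?_cons]
        constructor
        · rintro (rfl | ⟨hna, hh⟩)
          · exact ⟨hxs, rfl⟩
          · exact absurd ((PySem.Set.mem_add _ _ _).mpr (Or.inr hk.symm)) hna
        · rintro ⟨hns, hx⟩
          left
          injection hx with hx
          exact hx.symm
      · rw [if_neg (by simpa using hk)]
        constructor
        · rintro (rfl | ⟨hna, hh⟩)
          · exact absurd rfl hk
          · exact ⟨fun hm => hna ((PySem.Set.mem_add _ _ _).mpr (Or.inl hm)), hh⟩
        · rintro ⟨hns, hh⟩
          right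
          refine ⟨?_, hh⟩
          intro hm
          rcases (PySem.Set.mem_add _ _ _).mp hm with h1 | h2
          · exact hns h1
          · exact hk h2.symm

theorem pvDedup_sublist (xs : List (Int × String)) (seen : PySem.Set String) :
    (pvDedup seen xs).Sublist xs := by
  induction xs generalizing seen with
  | nil => simp [pvDedup]
  | cons p rest ih =>
    simp only [pvDedup]
    by_cases hs : PySem.Set.contains seen (pvKey2 p)
    · simp only [hs, if_true]
      exact (ih seen).cons p
    · simp only [hs, if_false, Bool.false_eq_true]
      exact (ih _).cons₂ p

theorem pvDedup_pairwise_ne (xs : List (Int × String)) (seen : PySem.Set String) :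
    (pvDedup seen xs).Pairwise (fun a b => pvKey2 a ≠ pvKey2 b) := by
  induction xs generalizing seen with
  | nil => simp [pvDedup]
  | cons x r ih =>
    simp only [pvDedup]
    by_cases hs : PySem.Set.contains seen (pvKey2 x) = true
    · rw [if_pos hs]; exact ih seen
    · rw [if_neg hs]
      refine List.Pairwise.cons ?_ (ih _)
      intro b hb he
      have hmem := ((pvMem_dedup r _ b).mp hb).1
      exact hmem ((PySem.Set.mem_add _ _ _).mpr (Or.inr he.symm))

theorem pvTakeA_eq (limit : Int) (xs : List (Int × String)) (seen : PySem.Set String) (out : List String) :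
    pvTakeA limit xs seen out = pvTakeL limit ((pvDedup seen xs).map (·.2)) out := by
  induction xs generalizing seen out with
  | nil => simp [pvTakeA, pvDedup, pvTakeL]
  | cons p rest ih =>
    simp only [pvTakeA, pvDedup, pvKey2]
    by_cases hs : PySem.Set.contains seen (PySem.Str.lower p.2) = true
    · rw [if_pos hs, if_pos hs]
      exact ih seen out
    · rw [if_neg hs, if_neg hs]
      simp only [List.map_cons, pvTakeL]
      by_cases hc : limit ≤ (((out ++ [p.2]).length : Nat) : Int)
      · rw [if_pos hc, if_pos hc]
      · rw [if_neg hc, if_neg hc]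
        exact ih _ _

theorem pvTakeB_eq (limit : Int) (ys : List (String × (Int × String))) (out : List String) :
    pvTakeB limit ys out = pvTakeL limit (ys.map (·.2.2)) out := by
  induction ys generalizing out with
  | nil => simp [pvTakeB, pvTakeL]
  | cons kv rest ih =>
    simp only [pvTakeB, pvTakeL, List.map_cons]
    by_cases hc : limit ≤ (((out ++ [kv.2.2]).length : Nat) : Int)
    · rw [if_pos hc, if_pos hc]
    · rw [if_neg hc, if_neg hc]
      exact ih _

theorem pvKeyA_lt_of_le_ne (a b : Int × String) (hle : pvKeyA a ≤ pvKeyA b) (hne : pvKey2 a ≠ pvKey2 b) :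
    pvKeyA a < pvKeyA b := by
  refine lt_of_le_of_ne hle ?_
  intro he
  apply hne
  unfold pvKeyA at he
  have h2 := congrArg Prod.snd (toLex_inj.mp he)
  unfold pvKey2
  exact String.toList_inj.mp h2

theorem pvRanked_eq (normed : List String) :
    PySem.List.sorted (normed.foldl pvBestStep PySem.Dict.empty).items pvKeyB =
      (pvDedup PySem.Set.empty (PySem.List.sorted (pvScored normed) pvKeyA)).map (fun p => (pvKey2 p, p)) := by
  set S := pvScored normed with hS
  set d := normed.foldl pvBestStep PySem.Dict.empty with hd
  set M := pvDedup PySem.Set.empty (PySem.List.sorted S pvKeyA) with hM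
  have hnodup_keys : d.keys.Nodup := pvKeys_nodup normed
  have hkeys_map : d.keys = d.items.map (·.1) := rfl
  have hnodup_items : d.items.Nodup := List.Nodup.of_map _ (hkeys_map ▸ hnodup_keys)
  have hpair_ne : M.Pairwise (fun a b => pvKey2 a ≠ pvKey2 b) := pvDedup_pairwise_ne _ _
  have hpair_le : M.Pairwise (fun a b => pvKeyA a ≤ pvKeyA b) :=
    List.Pairwise.sublist (pvDedup_sublist _ _) (PySem.List.sorted_pairwise S pvKeyA)
  have hnodup_M : M.Nodup := hpair_ne.imp (fun h he => h (by rw [he]))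
  have hnodup_M' : ((M.map (fun p => (pvKey2 p, p))).Nodup) := by
    refine List.Nodup.map ?_ hnodup_M
    intro a b hab
    exact congrArg Prod.snd hab
  have hmemM : ∀ (p : Int × String), p ∈ M ↔ pvRep S (pvKey2 p) = some p := by
    intro p
    rw [hM, pvMem_dedup, pvSortedFirst]
    constructor
    · rintro ⟨-, h⟩; exact h
    · intro h
      refine ⟨?_, h⟩
      simp [PySem.Set.empty]
  have hmem : ∀ (a : String × (Int × String)),
      a ∈ M.map (fun p => (pvKey2 p, p)) ↔ a ∈ d.items := by
    rintro ⟨k, p⟩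
    rw [pvMem_items d hnodup_keys k p, hd, pvGet?_eq_rep]
    constructor
    · intro hmm
      rcases List.mem_map.mp hmm with ⟨q, hq, heq⟩
      injection heq with h1 h2
      subst h2
      rw [← h1]
      exact (hmemM q).mp hq
    · intro h
      have hk := pvRep_key _ _ _ h
      refine List.mem_map.mpr ⟨p, ?_, ?_⟩
      · exact (hmemM p).mpr (by rw [hk]; exact h)
      · rw [hk]
  apply PySem.List.sorted_eq_of_perm_of_pairwise_lt
  · exact (List.perm_ext_iff_of_nodup hnodup_M' hnodup_items).mpr hmem
  · rw [List.pairwise_map]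
    refine ((hpair_le.and hpair_ne).imp ?_)
    intro a b hab
    show pvKeyA a < pvKeyA b
    exact pvKeyA_lt_of_le_ne a b hab.1 hab.2

-- ===== VERDICT (by name: the statement is the Claim_ definition above) =====
theorem pick_concrete_jd_terms_for_summary_py_spec : Claim_equal_pick_concrete_jd_terms_for_summary_py := by
  intro normed_kws limit _
  unfold Spec_pick_concrete_jd_terms_for_summary_py
  unfold pick_concrete_jd_terms_for_summary_py pick_concrete_jd_terms_for_summary_py_alt
  by_cases h : normed_kws = []
  · simp [h]
  · simp only [h]
    rw [pvScored_eq, pvTakeA_eq, pvTakeB_eq, pvRanked_eq]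
    rw [List.map_map]
    rfl
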